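-- pv_equiv track=rewrite | github.com/banlany/py_learn | run.py | left_num
-- ===== SOURCE A (Python) =====
-- def left_num(num):
--     if num == 0:
--         return 0
--     else:
--         c = 0
--         k = num//2
--         for i in range(1,k+1):
--             c += left_num(i)
--             if i // 10 >0:
--                 if i%10//2 >= i//10:
--                     c -= left_num(i%10)
--         return c+1
-- ===== SOURCE B (Python) =====
-- def _row(n, dp):
--     c = 0
--     for i in range(1, n // 2 + 1):
--         c += dp[i]
--         if i // 10 > 0 and i % 10 // 2 >= i // 10:
--             c -= dp[i % 10]
--     return c + 1
--
--
-- def left_num(num):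
--     if num == 0:
--         return 0
--     k = num // 2
--     dp = [0]
--     for j in range(1, k + 1):
--         dp.append(_row(j, dp))
--     return _row(num, dp)
-- ===== Notes on version B (the rewrite author's own statement) =====
-- stated objective: faster
-- what changed: Replaces the exponential self-referential recursion by a bottom-up dynamic-programming table dp[0..num//2] filled once, each entry computed from earlier entries by the same summation formula.
import Mathlib
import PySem

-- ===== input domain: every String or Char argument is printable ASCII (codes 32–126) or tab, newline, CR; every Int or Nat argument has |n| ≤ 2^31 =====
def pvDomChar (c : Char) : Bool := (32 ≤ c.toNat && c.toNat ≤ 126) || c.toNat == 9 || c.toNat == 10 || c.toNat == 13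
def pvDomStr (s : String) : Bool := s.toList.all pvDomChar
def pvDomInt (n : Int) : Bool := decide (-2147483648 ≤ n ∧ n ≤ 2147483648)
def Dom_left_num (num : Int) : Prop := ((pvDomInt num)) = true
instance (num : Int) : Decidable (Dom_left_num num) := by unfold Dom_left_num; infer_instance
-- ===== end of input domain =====

-- B replaces A's exponential self-referential recursion by a bottom-up DP table over 0..num//2 (faster).

-- ===== PORT A =====
-- Literal port of A's recursion; the Nat fuel only makes the same computation total
-- (fuel num.toNat + 1 always suffices: every recursive argument is strictly smaller, see fuel lemmas below).
def leftNumFuel : Nat → Int → Int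
  | 0, _ => 0
  | fuel + 1, num =>
    if num = 0 then 0
    else
      let k := PySem.Int.floordiv num 2
      let c := (PySem.List.pyRange 1 (k + 1) 1).foldl
        (fun c i =>
          let c := c + leftNumFuel fuel i
          if PySem.Int.floordiv i 10 > 0 then
            if PySem.Int.floordiv (PySem.Int.mod i 10) 2 ≥ PySem.Int.floordiv i 10 then
              c - leftNumFuel fuel (PySem.Int.mod i 10)
            else c
          else c) 0
      c + 1

def left_num (num : Int) : Int := leftNumFuel (num.toNat + 1) num

-- ===== PORT B =====
-- dp[i] is always a nonnegative in-range index in Source B, so pyGetD is exact here.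
def rowB (n : Int) (dp : List Int) : Int :=
  ((PySem.List.pyRange 1 (PySem.Int.floordiv n 2 + 1) 1).foldl
    (fun c i =>
      let c := c + PySem.List.pyGetD dp i 0
      if PySem.Int.floordiv i 10 > 0 ∧
          PySem.Int.floordiv (PySem.Int.mod i 10) 2 ≥ PySem.Int.floordiv i 10 then
        c - PySem.List.pyGetD dp (PySem.Int.mod i 10) 0
      else c) 0) + 1

def left_num_alt (num : Int) : Int :=
  if num = 0 then 0
  else
    let k := PySem.Int.floordiv num 2
    let dp := (PySem.List.pyRange 1 (k + 1) 1).foldl (fun dp j => dp ++ [rowB j dp]) [0]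
    rowB num dp

-- ===== PRECONDITION & SPEC =====
def Spec_left_num (num : Int) (out : Int) : Prop := out = left_num_alt num
instance (num : Int) (out : Int) : Decidable (Spec_left_num num out) := by unfold Spec_left_num; infer_instance

-- ===== CLAIM (what is proved, stated in full; the proofs are below) =====
def Claim_equal_left_num : Prop := ∀ (num : Int), Dom_left_num num → Spec_left_num num (left_num num)

-- ===== LEMMAS AND PROOFS =====

-- arithmetic helpers
lemma floordiv_two_lt (num : Int) (h : 2 ≤ num) : PySem.Int.floordiv num 2 < num := by
  rw [PySem.Int.floordiv_eq_ediv_of_pos (by omega)]; omega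

lemma floordiv_two_neg (num : Int) (h : num < 0) : PySem.Int.floordiv num 2 < 0 := by
  rw [PySem.Int.floordiv_eq_ediv_of_pos (by omega)]; omega

lemma floordiv_two_nonneg (num : Int) (h : 0 ≤ num) : 0 ≤ PySem.Int.floordiv num 2 := by
  rw [PySem.Int.floordiv_eq_ediv_of_pos (by omega)]; omega

lemma two_le_of_one_le_half {num : Int} (h : 1 ≤ PySem.Int.floordiv num 2) : 2 ≤ num := by
  have := (PySem.Int.le_floordiv_iff_mul_le (a := num) (b := 2) (q := 1) (by omega)).1 h
  omega

lemma ten_le_of_pos_div_ten {i : Int} (h : 0 < PySem.Int.floordiv i 10) : 10 ≤ i := by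
  have := (PySem.Int.le_floordiv_iff_mul_le (a := i) (b := 10) (q := 1) (by omega)).1 h
  omega

lemma mod_ten_lt_self {i : Int} (h : 10 ≤ i) : 0 ≤ PySem.Int.mod i 10 ∧ PySem.Int.mod i 10 < i := by
  refine ⟨PySem.Int.mod_nonneg i (by omega), ?_⟩
  have := PySem.Int.mod_lt i (b := 10) (by omega); omega

-- fuel stability: any fuel strictly above num.toNat computes the same value
lemma fuel_stable : ∀ (t : Nat) (num : Int), num.toNat ≤ t →
    ∀ n m : Nat, num.toNat < n → num.toNat < m → leftNumFuel n num = leftNumFuel m num := by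
  intro t
  induction t with
  | zero =>
    intro num ht n m hn hm
    obtain ⟨n', rfl⟩ : ∃ n', n = n' + 1 := ⟨n - 1, by omega⟩
    obtain ⟨m', rfl⟩ : ∃ m', m = m' + 1 := ⟨m - 1, by omega⟩
    simp only [leftNumFuel]
    by_cases h0 : num = 0
    · simp [h0]
    · have hneg : num < 0 := by omega
      rw [if_neg h0, if_neg h0,
        PySem.List.pyRange_one_eq_nil (by have := floordiv_two_neg num hneg; omega)]
      rfl
  | succ t ih =>
    intro num ht n m hn hm
    obtain ⟨n', rfl⟩ : ∃ n', n = n' + 1 := ⟨n - 1, by omega⟩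
    obtain ⟨m', rfl⟩ : ∃ m', m = m' + 1 := ⟨m - 1, by omega⟩
    simp only [leftNumFuel]
    by_cases h0 : num = 0
    · simp [h0]
    rw [if_neg h0, if_neg h0]
    have hfold : (PySem.List.pyRange 1 (PySem.Int.floordiv num 2 + 1) 1).foldl
        (fun c i =>
          let c := c + leftNumFuel n' i
          if PySem.Int.floordiv i 10 > 0 then
            if PySem.Int.floordiv (PySem.Int.mod i 10) 2 ≥ PySem.Int.floordiv i 10 then
              c - leftNumFuel n' (PySem.Int.mod i 10)
            else c
          else c) 0 =
      (PySem.List.pyRange 1 (PySem.Int.floordiv num 2 + 1) 1).foldl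
        (fun c i =>
          let c := c + leftNumFuel m' i
          if PySem.Int.floordiv i 10 > 0 then
            if PySem.Int.floordiv (PySem.Int.mod i 10) 2 ≥ PySem.Int.floordiv i 10 then
              c - leftNumFuel m' (PySem.Int.mod i 10)
            else c
          else c) 0 := by
      apply PySem.List.foldl_congr_mem
      intro acc i hi
      rw [PySem.List.mem_pyRange_one] at hi
      have hnum2 : 2 ≤ num := two_le_of_one_le_half (by omega)
      have hik : i < num := by have := floordiv_two_lt num hnum2; omega
      have h1 : leftNumFuel n' i = leftNumFuel m' i :=
        ih i (by omega) n' m' (by omega) (by omega)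
      rw [h1]
      by_cases hb : PySem.Int.floordiv i 10 > 0
      · have h10 : 10 ≤ i := ten_le_of_pos_div_ten hb
        have hm10 := mod_ten_lt_self h10
        have h2 : leftNumFuel n' (PySem.Int.mod i 10) = leftNumFuel m' (PySem.Int.mod i 10) :=
          ih (PySem.Int.mod i 10) (by omega) n' m' (by omega) (by omega)
        rw [h2]
      · rw [if_neg hb, if_neg hb]
    rw [hfold]

-- one-step characterisation of A's recursion, with left_num itself in the body
lemma leftA_step (num : Int) (h0 : num ≠ 0) :
    left_num num = ((PySem.List.pyRange 1 (PySem.Int.floordiv num 2 + 1) 1).foldl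
      (fun c i =>
        let c := c + left_num i
        if PySem.Int.floordiv i 10 > 0 then
          if PySem.Int.floordiv (PySem.Int.mod i 10) 2 ≥ PySem.Int.floordiv i 10 then
            c - left_num (PySem.Int.mod i 10)
          else c
        else c) 0) + 1 := by
  show leftNumFuel (num.toNat + 1) num = _
  simp only [leftNumFuel, if_neg h0]
  congr 1
  apply PySem.List.foldl_congr_mem
  intro acc i hi
  rw [PySem.List.mem_pyRange_one] at hi
  have hnum2 : 2 ≤ num := two_le_of_one_le_half (by omega)
  have hik : i < num := by
    have := floordiv_two_lt num hnum2; omega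
  have h1 : leftNumFuel num.toNat i = left_num i :=
    fuel_stable i.toNat i (le_refl _) num.toNat (i.toNat + 1) (by omega) (by omega)
  rw [h1]
  by_cases hb : PySem.Int.floordiv i 10 > 0
  · have h10 : 10 ≤ i := ten_le_of_pos_div_ten hb
    have hm10 := mod_ten_lt_self h10
    have h2 : leftNumFuel num.toNat (PySem.Int.mod i 10) = left_num (PySem.Int.mod i 10) :=
      fuel_stable (PySem.Int.mod i 10).toNat _ (le_refl _) num.toNat _ (by omega) (by omega)
    rw [h2]
  · rw [if_neg hb, if_neg hb]

-- B's else branch, spelled out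
lemma leftB_ne (num : Int) (h0 : num ≠ 0) :
    left_num_alt num = rowB num ((PySem.List.pyRange 1 (PySem.Int.floordiv num 2 + 1) 1).foldl
      (fun dp j => dp ++ [rowB j dp]) [0]) := by
  rw [left_num_alt, if_neg h0]

-- rowB computes A's value whenever dp is correct up to n // 2
lemma rowB_correct (n : Int) (dp : List Int)
    (hdp : ∀ i : Int, 0 ≤ i → i ≤ PySem.Int.floordiv n 2 → PySem.List.pyGetD dp i 0 = left_num i)
    (h0 : n ≠ 0) : rowB n dp = left_num n := by
  rw [leftA_step n h0, rowB]
  congr 1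
  apply PySem.List.foldl_congr_mem
  intro acc i hi
  rw [PySem.List.mem_pyRange_one] at hi
  rw [hdp i (by omega) (by omega)]
  by_cases hb : PySem.Int.floordiv i 10 > 0
  · have h10 : 10 ≤ i := ten_le_of_pos_div_ten hb
    have hm10 := mod_ten_lt_self h10
    rw [hdp (PySem.Int.mod i 10) (by omega) (by omega)]
    by_cases hq : PySem.Int.floordiv (PySem.Int.mod i 10) 2 ≥ PySem.Int.floordiv i 10
    · rw [if_pos hb, if_pos hq, if_pos ⟨hb, hq⟩]
    · rw [if_pos hb, if_neg hq, if_neg (by tauto)]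
  · rw [if_neg hb, if_neg (by tauto)]

-- the dp table built by B's loop is correct and has length k + 1 (for 0 ≤ k)
lemma dp_inv (k : Int) (hk : 0 ≤ k) :
    let dp := (PySem.List.pyRange 1 (k + 1) 1).foldl (fun dp j => dp ++ [rowB j dp]) [0]
    dp.length = k.toNat + 1 ∧
      ∀ t : Int, 0 ≤ t → t ≤ k → PySem.List.pyGetD dp t 0 = left_num t := by
  intro dp
  obtain ⟨kn, rfl⟩ : ∃ kn : Nat, k = (kn : Int) := ⟨k.toNat, by omega⟩
  clear hk
  induction kn with
  | zero =>
    have hdp : dp = [0] := by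
      show (PySem.List.pyRange 1 (((0 : Nat) : Int) + 1) 1).foldl
        (fun dp j => dp ++ [rowB j dp]) [0] = [0]
      rw [PySem.List.pyRange_one_eq_nil (by norm_num)]
      rfl
    refine ⟨by rw [hdp]; rfl, ?_⟩
    intro t ht0 htk
    have ht : t = 0 := by omega
    rw [hdp, ht]
    decide
  | succ kn ih =>
    have hsplit : PySem.List.pyRange 1 ((kn : Int) + 1 + 1) 1 =
        PySem.List.pyRange 1 ((kn : Int) + 1) 1 ++ [(kn : Int) + 1] := by
      exact_mod_cast PySem.List.pyRange_one_succ_right (a := 1) (b := (kn : Int) + 1) (by omega)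
    set dpPrev := (PySem.List.pyRange 1 ((kn : Int) + 1) 1).foldl (fun dp j => dp ++ [rowB j dp]) [0] with hdpPrev
    have hdp_eq : dp = dpPrev ++ [rowB ((kn : Int) + 1) dpPrev] := by
      show (PySem.List.pyRange 1 ((kn : Int) + 1 + 1) 1).foldl (fun dp j => dp ++ [rowB j dp]) [0] = _
      rw [hsplit, List.foldl_append]
      rfl
    obtain ⟨ihlen, ihget⟩ := ih
    have hprev_get : ∀ i : Int, 0 ≤ i → i < (kn : Int) + 1 →
        PySem.List.pyGetD (dpPrev ++ [rowB ((kn : Int) + 1) dpPrev]) i 0 = left_num i := by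
      intro i h0 h1
      rw [PySem.List.pyGetD_eq_getElem _ 0 h0
        (by simp only [List.length_append, List.length_singleton, ihlen]; omega),
        List.getElem_append_left (by omega)]
      have := ihget i h0 (by omega)
      rw [PySem.List.pyGetD_eq_getElem _ 0 h0 (by rw [ihlen]; push_cast; omega)] at this
      exact this
    have hrow : rowB ((kn : Int) + 1) dpPrev = left_num ((kn : Int) + 1) := by
      apply rowB_correct
      · intro i h0 hi
        have hhalf : PySem.Int.floordiv ((kn : Int) + 1) 2 ≤ (kn : Int) := by
          rw [PySem.Int.floordiv_eq_ediv_of_pos (by omega)]; omega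
        exact ihget i h0 (by omega)
      · omega
    constructor
    · rw [hdp_eq]
      simp only [List.length_append, List.length_singleton, ihlen]
      omega
    · intro t ht0 htk
      rw [hdp_eq]
      by_cases hlt : t < (kn : Int) + 1
      · exact hprev_get t ht0 hlt
      · have : t = (kn : Int) + 1 := by omega
        subst this
        have hidx : ((kn : Int) + 1).toNat = dpPrev.length := by rw [ihlen]; omega
        rw [PySem.List.pyGetD_eq_getElem _ 0 ht0
          (by simp only [List.length_append, List.length_singleton, ihlen]; omega)]
        rw [List.getElem_append_right (by omega)]
        simp [hidx, hrow]

-- ===== VERDICT (by name: the statement is the Claim_ definition above) =====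
theorem left_num_spec : Claim_equal_left_num := by
  unfold Claim_equal_left_num Spec_left_num
  intro num _
  by_cases h0 : num = 0
  · subst h0; decide
  rw [leftB_ne num h0]
  by_cases hneg : num < 0
  · -- empty dp loop and empty row loop on both sides
    have hk := floordiv_two_neg num hneg
    rw [leftA_step num h0, rowB]
    rw [PySem.List.pyRange_one_eq_nil (a := (1:Int)) (by omega)]
    rfl
  · have hk0 : 0 ≤ PySem.Int.floordiv num 2 := floordiv_two_nonneg num (by omega)
    obtain ⟨hlen, hget⟩ := dp_inv (PySem.Int.floordiv num 2) hk0
    exact (rowB_correct num _ (fun i h0i hik => hget i h0i hik) h0).symm
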